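-- pv_equiv track=rewrite | github.com/kidist-amde/ddro | src/pretrain/hf_eval/eval_hf_docid_ranking.py | docid2string_msmarco
-- ===== SOURCE A (Python) =====
-- from typing import Dict, Iterable, List, Tuple
--
-- def docid2string_msmarco(ids: List[int]) -> str:
--     """Drop 0s, keep a single EOS=1, trim after first 1."""
--     seq: List[int] = []
--     for x in ids:
--         if x == 0:
--             continue
--         if x == 1:
--             seq.append(1)
--             break
--         seq.append(x)
--     return ",".join(map(str, seq))
-- ===== SOURCE B (Python) =====
-- from typing import List
--
-- def docid2string_msmarco(ids: List[int]) -> str: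
--     """Drop 0s, keep a single EOS=1, trim after first 1."""
--     if 1 in ids:
--         seq = [x for x in ids[:ids.index(1)] if x != 0] + [1]
--     else:
--         seq = [x for x in ids if x != 0]
--     return ",".join(map(str, seq))
-- ===== Notes on version B (the rewrite author's own statement) =====
-- stated objective: alternative
-- what changed: Replaces the accumulating loop with mid-loop break by a find-EOS-boundary-then-filter decomposition: locate the first 1 with index(), filter zeros from the prefix, and append the EOS token.
import Mathlib
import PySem

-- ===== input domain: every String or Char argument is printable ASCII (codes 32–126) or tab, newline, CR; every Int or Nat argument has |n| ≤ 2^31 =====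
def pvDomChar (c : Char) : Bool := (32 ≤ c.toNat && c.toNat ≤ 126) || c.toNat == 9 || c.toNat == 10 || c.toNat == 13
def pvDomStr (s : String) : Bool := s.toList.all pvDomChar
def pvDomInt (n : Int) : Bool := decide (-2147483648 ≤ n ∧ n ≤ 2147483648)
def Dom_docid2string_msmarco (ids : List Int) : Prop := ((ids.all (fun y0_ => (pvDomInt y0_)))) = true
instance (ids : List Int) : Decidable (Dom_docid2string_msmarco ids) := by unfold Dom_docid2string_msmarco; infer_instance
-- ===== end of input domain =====

-- B replaces A's accumulate-with-break loop by a find-EOS-boundary-then-filter-prefix decomposition; objective: alternative (same cost).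

-- ===== PORT A =====
-- A's loop with `continue`/`break`: structural recursion carrying the same decisions in the same order.
def pvALoop : List Int → List Int
  | [] => []
  | x :: xs => if x = 0 then pvALoop xs else if x = 1 then [1] else x :: pvALoop xs

def docid2string_msmarco (ids : List Int) : String :=
  PySem.Str.join "," ((pvALoop ids).map PySem.Int.toStr)

-- ===== PORT B =====
-- B: if 1 in ids, seq = [x for x in ids[:ids.index(1)] if x != 0] + [1]; else seq = [x for x in ids if x != 0].
def pvBSeq (ids : List Int) : List Int :=
  match PySem.List.index? ids 1 with
  | some i => (ids.take i).filter (fun x => x != 0) ++ [1]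
  | none => ids.filter (fun x => x != 0)

def docid2string_msmarco_alt (ids : List Int) : String :=
  PySem.Str.join "," ((pvBSeq ids).map PySem.Int.toStr)

-- ===== PRECONDITION & SPEC =====
def Spec_docid2string_msmarco (ids : List Int) (out : String) : Prop := out = docid2string_msmarco_alt ids
instance (ids : List Int) (out : String) : Decidable (Spec_docid2string_msmarco ids out) := by unfold Spec_docid2string_msmarco; infer_instance

-- ===== CLAIM (what is proved, stated in full; the proofs are below) =====
def Claim_equal_docid2string_msmarco : Prop := ∀ (ids : List Int), Dom_docid2string_msmarco ids → Spec_docid2string_msmarco ids (docid2string_msmarco ids)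

-- ===== LEMMAS AND PROOFS =====
theorem pvALoop_eq_pvBSeq (ids : List Int) : pvALoop ids = pvBSeq ids := by
  induction ids with
  | nil => rfl
  | cons x xs ih =>
    by_cases hx1 : x = 1
    · subst hx1
      rw [pvALoop]
      unfold pvBSeq
      rw [PySem.List.index?_cons_self]
      simp
    · have hidx : PySem.List.index? (x :: xs) 1 = (PySem.List.index? xs 1).map (fun j => j + 1) :=
        PySem.List.index?_cons_of_ne xs hx1
      by_cases hx0 : x = 0
      · subst hx0
        rw [pvALoop, if_pos rfl, ih]
        unfold pvBSeq
        rw [hidx]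
        cases h : PySem.List.index? xs 1 with
        | none => simp
        | some i => simp
      · rw [pvALoop, if_neg hx0, if_neg hx1, ih]
        unfold pvBSeq
        rw [hidx]
        cases h : PySem.List.index? xs 1 with
        | none => simp [hx0]
        | some i => simp [hx0]

-- ===== VERDICT (by name: the statement is the Claim_ definition above) =====
theorem docid2string_msmarco_spec : Claim_equal_docid2string_msmarco := by
  intro ids _
  unfold Spec_docid2string_msmarco docid2string_msmarco docid2string_msmarco_alt
  rw [pvALoop_eq_pvBSeq]
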